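-- pv_equiv track=rewrite | github.com/jsvitor/fpc-bsi-ufrpe | 1 - complexity/main.py | sum_value_of_complexity
-- ===== SOURCE A (Python) =====
-- def sum_value_of_complexity(array):
--   amount = 0
--   for i in array:
--     if i == 'IO': amount += 30
--
--     elif i == 'MEM': amount += 10
--
--     elif i == 'PROCSUM': amount += 1
--
--     elif i == 'PROCMULT': amount += 10
--
--   return amount
-- ===== SOURCE B (Python) =====
-- def sum_value_of_complexity(array):
--   # Multiplicity-based: four counting passes, then an arithmetic combination.
--   return (30 * array.count('IO')
--           + 10 * array.count('MEM')
--           + array.count('PROCSUM')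
--           + 10 * array.count('PROCMULT'))
-- ===== Notes on version B (the rewrite author's own statement) =====
-- stated objective: alternative
-- what changed: Replaces the single accumulating loop with an if/elif cascade by four independent counting passes (list.count per operation type) combined arithmetically as 30*cIO + 10*cMEM + cPROCSUM + 10*cPROCMULT.
import Mathlib
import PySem

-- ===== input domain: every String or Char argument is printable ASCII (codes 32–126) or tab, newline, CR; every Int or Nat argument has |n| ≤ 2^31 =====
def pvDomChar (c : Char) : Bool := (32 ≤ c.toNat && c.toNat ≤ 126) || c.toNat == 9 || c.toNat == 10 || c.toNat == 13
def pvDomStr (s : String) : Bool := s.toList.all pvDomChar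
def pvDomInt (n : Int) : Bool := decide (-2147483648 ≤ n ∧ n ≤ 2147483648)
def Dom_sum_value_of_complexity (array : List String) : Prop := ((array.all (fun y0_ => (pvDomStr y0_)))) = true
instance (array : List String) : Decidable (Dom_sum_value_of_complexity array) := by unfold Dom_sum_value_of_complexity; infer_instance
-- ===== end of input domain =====

-- B replaces A's single accumulating if/elif loop by four counting passes (list.count) combined arithmetically (alternative decomposition).


-- ===== PORT A =====
def sum_value_of_complexity (array : List String) : Int :=
  array.foldl (fun amount i =>
    if i == "IO" then amount + 30
    else if i == "MEM" then amount + 10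
    else if i == "PROCSUM" then amount + 1
    else if i == "PROCMULT" then amount + 10
    else amount) 0

-- ===== PORT B =====
def sum_value_of_complexity_alt (array : List String) : Int :=
  30 * (PySem.List.count array "IO" : Int)
    + 10 * (PySem.List.count array "MEM" : Int)
    + (PySem.List.count array "PROCSUM" : Int)
    + 10 * (PySem.List.count array "PROCMULT" : Int)

-- ===== PRECONDITION & SPEC =====
def Spec_sum_value_of_complexity (array : List String) (out : Int) : Prop := out = sum_value_of_complexity_alt array
instance (array : List String) (out : Int) : Decidable (Spec_sum_value_of_complexity array out) := by unfold Spec_sum_value_of_complexity; infer_instance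

-- ===== CLAIM =====
def Claim_equal_sum_value_of_complexity : Prop := ∀ (array : List String), Dom_sum_value_of_complexity array → Spec_sum_value_of_complexity array (sum_value_of_complexity array)

-- ===== LEMMAS AND PROOFS =====
lemma pv_fold_counts (array : List String) (a : Int) :
    array.foldl (fun amount i =>
      if i == "IO" then amount + 30
      else if i == "MEM" then amount + 10
      else if i == "PROCSUM" then amount + 1
      else if i == "PROCMULT" then amount + 10
      else amount) a
    = a + 30 * (array.count "IO" : Int) + 10 * (array.count "MEM" : Int)
        + (array.count "PROCSUM" : Int) + 10 * (array.count "PROCMULT" : Int) := by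
  induction array generalizing a with
  | nil => simp
  | cons x xs ih =>
    rw [List.foldl_cons]
    split_ifs with h1 h2 h3 h4 <;>
      simp_all [beq_iff_eq] <;> ring

-- ===== VERDICT =====
theorem sum_value_of_complexity_spec : Claim_equal_sum_value_of_complexity := by
  intro array _
  show sum_value_of_complexity array = sum_value_of_complexity_alt array
  unfold sum_value_of_complexity sum_value_of_complexity_alt
  rw [pv_fold_counts, PySem.List.count_eq, PySem.List.count_eq, PySem.List.count_eq, PySem.List.count_eq]
  ring
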